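-- pv_equiv track=rewrite | github.com/MZ59/learn_algorithm | leetcode/t1906.py | solution
-- ===== SOURCE A (Python) =====
-- def solution(nums, queries):
--     n = len(nums)
--     dp = [[0] * 101 for _ in range(n + 1)]
--     # 前缀和记录每个数在区间内出现的次数
--     for i in range(n):
--         for j in range(1, 101):
--             dp[i + 1][j] = dp[i][j]
--             dp[i + 1][nums[i]] += 1
--
--     res = [-1] * len(queries)
--     # 顺序查询
--     for i, (l, r) in enumerate(queries):
--         minv = float("inf") #极大值
--         pre = -float("inf") #极小值
--         # 判断区间内是否有不同数字出现
--         for j in range(1, 101):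
--             if dp[r + 1][j] - dp[l][j] > 0:
--                 minv = min(minv, j - pre)
--                 pre = j
--         # 区间内存在不同的数字
--         if minv != float("inf"):
--             res[i] = minv
--
--     return res
-- ===== SOURCE B (Python) =====
-- def solution(nums, queries):
--     # Values are 1..100, so answer each query by scanning the candidate
--     # values in order: those present in the window, then the minimum gap
--     # between consecutive present values (-1 if fewer than two).
--     res = []
--     for l, r in queries:
--         window = nums[l:r+1]
--         present = [v for v in range(1, 101) if v in window]
--         gaps = [b - a for a, b in zip(present, present[1:])]
--         res.append(min(gaps) if gaps else -1)
--     return res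
-- ===== Notes on version B (the rewrite author's own statement) =====
-- stated objective: simpler
-- what changed: Drops A's precomputed (n+1) x 101 prefix-count table entirely: B answers each query directly by scanning the candidate values 1..100 for membership in the queried window and taking the minimum gap between consecutive present values. Pre_ excludes inputs on which A raises IndexError, and queries with a negative bound or a negative window value, where A's returned value is an artefact of its fixed 101-slot table (negative-index wraparound sends value v to slot v+101 and bound l to row l+n+1); degenerate windows (both versions answer -1) stay inside the claim.
-- outside the precondition, e.g. on solution([-1, 5], [(0, 1)]): A returns [95], B returns [-1]; on solution([-5, -9], [(0, 1)]): A returns [4], B returns [-1]; on solution([5, 9], [(-2, 1)]): A returns [-1], B returns [4]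
import Mathlib
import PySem

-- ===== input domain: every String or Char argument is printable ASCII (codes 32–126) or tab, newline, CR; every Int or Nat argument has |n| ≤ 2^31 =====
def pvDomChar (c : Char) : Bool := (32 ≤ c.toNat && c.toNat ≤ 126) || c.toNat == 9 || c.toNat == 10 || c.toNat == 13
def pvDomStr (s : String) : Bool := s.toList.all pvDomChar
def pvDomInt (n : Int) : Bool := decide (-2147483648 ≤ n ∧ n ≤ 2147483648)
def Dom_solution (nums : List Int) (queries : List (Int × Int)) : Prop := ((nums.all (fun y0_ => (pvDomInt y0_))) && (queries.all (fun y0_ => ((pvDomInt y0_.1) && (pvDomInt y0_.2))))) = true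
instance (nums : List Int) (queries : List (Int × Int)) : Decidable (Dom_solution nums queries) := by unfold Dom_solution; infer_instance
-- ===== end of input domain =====

-- B answers each query directly: it scans the candidate values 1..100, keeps those present in
-- the queried window and takes the minimum gap between consecutive present values — no
-- precomputed prefix-count table; objective: simpler (per-query recomputation, shorter code).
-- Pre_solution excludes A's IndexError inputs and window/bound corners where A's value is an
-- artefact of its fixed 101-slot table (see the comment above Pre_solution).


-- ===== PORT A =====
-- Literal port of A. The Python floats float("inf") / -float("inf") are used only as sentinels
-- (minv, pre); they are ported as Option Int with none = the corresponding infinity — exact here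
-- because every other value mixed with them is an int.
def solution (nums : List Int) (queries : List (Int × Int)) : List Int :=
  let n : Int := nums.length
  let dp0 : List (List Int) := List.replicate (n.toNat + 1) (List.replicate 101 0)
  let dp := (PySem.List.pyRange 0 n 1).foldl (fun dp i =>
    let v := PySem.List.pyGetD nums i 0
    let newRow := (PySem.List.pyRange 1 101 1).foldl (fun row j =>
      let row := PySem.List.pySetD row j (PySem.List.pyGetD (PySem.List.pyGetD dp i []) j 0)
      PySem.List.pySetD row v (PySem.List.pyGetD row v 0 + 1))
      (PySem.List.pyGetD dp (i + 1) [])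
    PySem.List.pySetD dp (i + 1) newRow) dp0
  let res0 : List Int := List.replicate queries.length (-1)
  (PySem.List.enumerate queries 0).foldl (fun res iq =>
    let i := iq.1
    let l := iq.2.1
    let r := iq.2.2
    let final := (PySem.List.pyRange 1 101 1).foldl (fun (st : Option Int × Option Int) j =>
      if PySem.List.pyGetD (PySem.List.pyGetD dp (r + 1) []) j 0
           - PySem.List.pyGetD (PySem.List.pyGetD dp l []) j 0 > 0 then
        (match st.2 with
         | none => st.1                                     -- min(minv, +inf) = minv
         | some p => some (match st.1 with
                           | none => j - p                  -- min(+inf, j - p)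
                           | some m => min m (j - p)),
         some j)
      else st) (none, none)
    match final.1 with
    | some m => PySem.List.pySetD res i m
    | none => res) res0

-- ===== PORT B =====
-- present[1:] is ported as .tail (exact for a Python list slice [1:]).
def solution_alt (nums : List Int) (queries : List (Int × Int)) : List Int :=
  queries.foldl (fun res q =>
    let window := PySem.List.slice nums (some q.1) (some (q.2 + 1))
    let present := (PySem.List.pyRange 1 101 1).filter (fun v => decide (v ∈ window))
    let gaps := (present.zip present.tail).map (fun ab => ab.2 - ab.1)
    res ++ [match PySem.List.min? gaps (fun x => x) with
            | some m => m
            | none => -1]) []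

-- ===== PRECONDITION & SPEC =====
-- The stretch of nums between the two prefix rows a query's bounds select (Python wraparound:
-- a row index is taken modulo n+1); used by Pre_solution's degenerate-window case.
def pvWrapWindow (nums : List Int) (i j : Int) : List Int :=
  (nums.drop (PySem.Int.mod i ((nums.length : Int) + 1)).toNat).take
    ((PySem.Int.mod j ((nums.length : Int) + 1)).toNat -
     (PySem.Int.mod i ((nums.length : Int) + 1)).toNat)

-- Pre_solution excludes inputs on which A raises IndexError (a value outside -101..100 or a
-- query bound outside -(n+1)..n), and — although A still returns there — queries with a negative
-- bound or with a negative value in the queried window, where A's value is an artefact of its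
-- fixed 101-slot table (Python wraparound maps a negative value v to slot v+101 and a negative
-- bound l to row l+n+1). Kept inside the claim: non-negative bounds with a window entirely in
-- 0..100 (the value 0 lands in slot 0, which neither version's 1..100 scan visits), and
-- arbitrary bounds whose two effective windows are degenerate (both versions answer -1).
def Pre_solution (nums : List Int) (queries : List (Int × Int)) : Prop :=
  (∀ v ∈ nums, -101 ≤ v ∧ v ≤ 100) ∧
  (∀ q ∈ queries,
    -((nums.length : Int) + 1) ≤ q.1 ∧ q.1 ≤ (nums.length : Int) ∧
    -((nums.length : Int) + 1) ≤ q.2 + 1 ∧ q.2 + 1 ≤ (nums.length : Int) ∧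
    ((0 ≤ q.1 ∧ 0 ≤ q.2 + 1 ∧
      (∀ v ∈ PySem.List.slice nums (some q.1) (some (q.2 + 1)), 0 ≤ v ∧ v ≤ 100)) ∨
     ((∀ u ∈ pvWrapWindow nums q.1 (q.2 + 1), u ≠ 0 → u ≠ -101 →
         ∀ v ∈ pvWrapWindow nums q.1 (q.2 + 1), v ≠ 0 → v ≠ -101 → u = v) ∧
      (∀ u ∈ PySem.List.slice nums (some q.1) (some (q.2 + 1)), 1 ≤ u → u ≤ 100 →
         ∀ v ∈ PySem.List.slice nums (some q.1) (some (q.2 + 1)), 1 ≤ v → v ≤ 100 → u = v))))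
instance (nums : List Int) (queries : List (Int × Int)) : Decidable (Pre_solution nums queries) := by
  unfold Pre_solution; infer_instance

def pvWitness_solution : List Int × (List (Int × Int)) := ([1, 3, 50, 3], [(0, 2), (1, 1), (2, 3)])

def Spec_solution (nums : List Int) (queries : List (Int × Int)) (out : List Int) : Prop := out = solution_alt nums queries
instance (nums : List Int) (queries : List (Int × Int)) (out : List Int) : Decidable (Spec_solution nums queries out) := by unfold Spec_solution; infer_instance

-- ===== CLAIM (what is proved, stated in full; the proofs are below) =====
def Claim_equal_solution : Prop := ∀ (nums : List Int) (queries : List (Int × Int)), Dom_solution nums queries → Pre_solution nums queries → Spec_solution nums queries (solution nums queries)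

-- ===== LEMMAS AND PROOFS =====

theorem solution_witness_ok :
    Dom_solution pvWitness_solution.1 pvWitness_solution.2 ∧
    Pre_solution pvWitness_solution.1 pvWitness_solution.2 := by decide

-- abbreviations for the two ports' loop bodies (proof-side names only)
def pvRowStep (prev : List Int) (v : Int) (row : List Int) (j : Int) : List Int :=
  PySem.List.pySetD (PySem.List.pySetD row j (PySem.List.pyGetD prev j 0)) v
    (PySem.List.pyGetD (PySem.List.pySetD row j (PySem.List.pyGetD prev j 0)) v 0 + 1)

def pvOuter (nums : List Int) (dp : List (List Int)) (i : Int) : List (List Int) :=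
  PySem.List.pySetD dp (i + 1)
    ((PySem.List.pyRange 1 101 1).foldl
      (pvRowStep (PySem.List.pyGetD dp i []) (PySem.List.pyGetD nums i 0))
      (PySem.List.pyGetD dp (i + 1) []))

def pvDp (nums : List Int) (m : Nat) : List (List Int) :=
  (PySem.List.pyRange 0 (m : Int) 1).foldl (pvOuter nums)
    (List.replicate (nums.length + 1) (List.replicate 101 0))

def pvAstep (st : Option Int × Option Int) (j : Int) : Option Int × Option Int :=
  (match st.2 with
   | none => st.1
   | some p => some (match st.1 with
                     | none => j - p
                     | some m => min m (j - p)),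
   some j)

def pvBstep (best : Int) (ab : Int × Int) : Int :=
  if best == -1 || ab.2 - ab.1 < best then ab.2 - ab.1 else best

def pvQueryOpt (dp : List (List Int)) (q : Int × Int) : Option Int :=
  ((PySem.List.pyRange 1 101 1).foldl (fun st j =>
    if PySem.List.pyGetD (PySem.List.pyGetD dp (q.2 + 1) []) j 0
         - PySem.List.pyGetD (PySem.List.pyGetD dp q.1 []) j 0 > 0 then
      pvAstep st j
    else st) (none, none)).1

-- the value slots A's table really counts: nums[i] indexes a 101-slot row with Python wraparound
def pvSlots (nums : List Int) : List Int := nums.map (fun v => PySem.Int.mod v 101)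

-- indexing helpers (Int index)
theorem pv_pyGetD_toNat (xs : List Int) (j : Int) (d : Int) (h : 0 ≤ j) :
    PySem.List.pyGetD xs j d = xs.getD j.toNat d := by
  simpa [Int.toNat_of_nonneg h] using PySem.List.pyGetD_natCast xs j.toNat d

theorem pv_pyGetD_toNat' (xs : List (List Int)) (j : Int) (h : 0 ≤ j) :
    PySem.List.pyGetD xs j ([] : List Int) = xs.getD j.toNat [] := by
  simpa [Int.toNat_of_nonneg h] using PySem.List.pyGetD_natCast xs j.toNat []

theorem pv_getD_setD_self (xs : List Int) (i w : Int) (h0 : 0 ≤ i) (h : i < (xs.length : Int)) :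
    PySem.List.pyGetD (PySem.List.pySetD xs i w) i 0 = w := by
  rw [PySem.List.pySetD_of_nonneg xs w h0, pv_pyGetD_toNat _ _ _ h0]
  have hi : i.toNat < xs.length := by omega
  simp [List.getD, hi]

theorem pv_getD_setD_ne (xs : List Int) (i j w : Int) (h0 : 0 ≤ i) (hj : 0 ≤ j) (hne : i ≠ j) :
    PySem.List.pyGetD (PySem.List.pySetD xs i w) j 0 = PySem.List.pyGetD xs j 0 := by
  rw [PySem.List.pySetD_of_nonneg xs w h0, pv_pyGetD_toNat _ _ _ hj, pv_pyGetD_toNat _ _ _ hj]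
  simp [List.getD]
  rw [List.getElem?_set_ne (by omega)]

theorem pv_emod_small (i L : Int) (h0 : 0 ≤ i) (h2 : i < L) : i % L = i := Int.emod_eq_of_lt h0 h2

theorem pv_emod_neg (i L : Int) (h1 : -L ≤ i) (h0 : i < 0) : i % L = i + L := by
  have h3 : (i + L) % L = i + L := Int.emod_eq_of_lt (by omega) (by omega)
  rw [← Int.add_emod_right]
  exact h3

-- Python's negative-index wraparound for xs[i] = ... and xs[i], as the index mod len
theorem pv_pySetD_wrap {α : Type} (xs : List α) (i : Int) (v : α)
    (h1 : -(xs.length : Int) ≤ i) (h2 : i < (xs.length : Int)) :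
    PySem.List.pySetD xs i v = xs.set (PySem.Int.mod i (xs.length : Int)).toNat v := by
  have hpos : (0 : Int) < (xs.length : Int) := by omega
  rw [PySem.Int.mod_eq_emod_of_pos hpos]
  simp only [PySem.List.pySetD, PySem.List.pySet?, PySem.List.pyIdx?]
  by_cases h0 : 0 ≤ i
  · rw [if_pos h0, if_pos (by exact_mod_cast h2), pv_emod_small i _ h0 h2]
    simp
  · rw [if_neg h0, if_pos (by omega), pv_emod_neg i _ h1 (by omega)]
    simp
    congr 1
    omega

theorem pv_pyGetD_wrap {α : Type} (xs : List α) (i : Int) (d : α)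
    (h1 : -(xs.length : Int) ≤ i) (h2 : i < (xs.length : Int)) :
    PySem.List.pyGetD xs i d = xs.getD (PySem.Int.mod i (xs.length : Int)).toNat d := by
  have hpos : (0 : Int) < (xs.length : Int) := by omega
  rw [PySem.Int.mod_eq_emod_of_pos hpos]
  by_cases h0 : 0 ≤ i
  · rw [pv_emod_small i _ h0 h2]
    simpa [Int.toNat_of_nonneg h0] using PySem.List.pyGetD_natCast xs i.toNat d
  · have hk1 : 0 < (-i).toNat := by omega
    have hk2 : (-i).toNat ≤ xs.length := by omega
    rw [pv_emod_neg i _ h1 (by omega)]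
    have hneg : i = -(((-i).toNat : Nat) : Int) := by omega
    rw [hneg, PySem.List.pyGetD_neg_natCast xs (-i).toNat d hk1 hk2]
    have ht : ((-(((-i).toNat : Nat) : Int)) + (xs.length : Int)).toNat = xs.length - (-i).toNat := by
      omega
    rw [ht, List.getD_eq_getElem _ _ (by omega)]

-- the inner 1..100 loop: characterisation of the produced row (the updated slot is v mod 101)
theorem pv_rowChar (prev : List Int) (v : Int) (hv1 : -101 ≤ v) (hv2 : v ≤ 100) :
    ∀ (k : Nat), k ≤ 100 → ∀ (row : List Int), row.length = 101 →
    ((PySem.List.pyRange (101 - (k : Int)) 101 1).foldl (pvRowStep prev v) row).length = 101 ∧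
    (∀ j : Int, 1 ≤ j → j ≤ 100 →
      PySem.List.pyGetD ((PySem.List.pyRange (101 - (k : Int)) 101 1).foldl (pvRowStep prev v) row) j 0 =
      if j = PySem.Int.mod v 101 then
        (if (101 - (k : Int)) ≤ j then PySem.List.pyGetD prev j 0 + (101 - j)
         else PySem.List.pyGetD row j 0 + (k : Int))
      else
        (if (101 - (k : Int)) ≤ j then PySem.List.pyGetD prev j 0
         else PySem.List.pyGetD row j 0)) := by
  set s := PySem.Int.mod v 101 with hsdef
  have hs0 : 0 ≤ s := by
    rw [hsdef]; exact PySem.Int.mod_nonneg v (by norm_num)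
  have hs1 : s ≤ 100 := by
    rw [hsdef]
    have := PySem.Int.mod_lt v (show (0:Int) < 101 by norm_num)
    omega
  have hconvS : ∀ (X : List Int) (w : Int), X.length = 101 →
      PySem.List.pySetD X v w = PySem.List.pySetD X s w := by
    intro X w hX
    rw [pv_pySetD_wrap X v w (by omega) (by omega), PySem.List.pySetD_of_nonneg X w hs0]
    rw [hX]
    rfl
  have hconvG : ∀ (X : List Int) (d : Int), X.length = 101 →
      PySem.List.pyGetD X v d = PySem.List.pyGetD X s d := by
    intro X d hX
    rw [pv_pyGetD_wrap X v d (by omega) (by omega), pv_pyGetD_toNat _ _ _ hs0]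
    rw [hX]
    rfl
  intro k
  induction k with
  | zero =>
    intro _ row hlen
    rw [PySem.List.pyRange_one_eq_nil (by omega)]
    refine ⟨hlen, ?_⟩
    intro j h1 h2
    simp only [List.foldl_nil]
    split_ifs <;> first | omega | norm_num
  | succ k ih =>
    intro hk row hlen
    have ha : (101 - ((k+1 : Nat) : Int)) < 101 := by push_cast; omega
    rw [PySem.List.pyRange_one_cons ha]
    set a : Int := 101 - ((k+1 : Nat) : Int) with hadef
    have hadef' : a = 101 - ((k : Int) + 1) := by rw [hadef]; push_cast; ring
    have ha1 : 1 ≤ a := by omega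
    have ha2 : a ≤ 100 := by omega
    simp only [List.foldl_cons]
    have harange : a + 1 = 101 - (k : Int) := by omega
    rw [harange]
    set row' := pvRowStep prev v row a with hrow'
    have hlen1 : (PySem.List.pySetD row a (PySem.List.pyGetD prev a 0)).length = 101 := by
      rw [PySem.List.length_pySetD]; exact hlen
    have hlen' : row'.length = 101 := by
      rw [hrow', pvRowStep, PySem.List.length_pySetD, PySem.List.length_pySetD]; exact hlen
    obtain ⟨ihlen, ihchar⟩ := ih (by omega) row' hlen'
    refine ⟨ihlen, ?_⟩
    intro j h1 h2
    rw [ihchar j h1 h2]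
    have hrow'_s : PySem.List.pyGetD row' s 0 =
        (if s = a then PySem.List.pyGetD prev a 0 else PySem.List.pyGetD row s 0) + 1 := by
      rw [hrow', pvRowStep, hconvS _ _ hlen1, hconvG _ _ hlen1]
      rw [pv_getD_setD_self _ _ _ hs0 (by rw [hlen1]; omega)]
      by_cases hsa : s = a
      · rw [hsa]
        rw [pv_getD_setD_self _ _ _ (by omega) (by rw [hlen]; omega)]
        simp
      · rw [pv_getD_setD_ne _ _ _ _ (by omega) hs0 (by omega)]
        simp [hsa]
    have hrow'_other : ∀ x : Int, 0 ≤ x → x ≤ 100 → x ≠ s →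
        PySem.List.pyGetD row' x 0 =
        (if x = a then PySem.List.pyGetD prev a 0 else PySem.List.pyGetD row x 0) := by
      intro x hx1 hx2 hxs
      rw [hrow', pvRowStep, hconvS _ _ hlen1]
      rw [pv_getD_setD_ne _ _ _ _ hs0 hx1 (by omega)]
      by_cases hxa : x = a
      · rw [hxa]
        rw [pv_getD_setD_self _ _ _ (by omega) (by rw [hlen]; omega)]
        simp
      · rw [pv_getD_setD_ne _ _ _ _ (by omega) hx1 (by omega)]
        simp [hxa]
    by_cases hjs : j = s
    · simp only [if_pos hjs]
      rw [hjs] at h1 h2 ⊢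
      rw [hrow'_s]
      by_cases hsa : s = a
      · simp only [if_pos hsa]
        rw [hsa]
        split_ifs <;> omega
      · simp only [if_neg hsa]
        split_ifs <;> omega
    · simp only [if_neg hjs]
      rw [hrow'_other j (by omega) h2 hjs]
      by_cases hja : j = a
      · simp only [if_pos hja]
        rw [hja]
        split_ifs <;> omega
      · simp only [if_neg hja]
        split_ifs <;> omega

-- characterisation of the full dp table: row i counts the slots of nums[0:i], weighted by 101-j
set_option maxRecDepth 8192 in
theorem pv_dpChar (nums : List Int) (hnums : ∀ v ∈ nums, -101 ≤ v ∧ v ≤ 100) :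
    ∀ (m : Nat), m ≤ nums.length →
    (pvDp nums m).length = nums.length + 1 ∧
    (∀ i : Nat, i ≤ nums.length → ((pvDp nums m).getD i []).length = 101) ∧
    (∀ i : Nat, i ≤ m → ∀ j : Int, 1 ≤ j → j ≤ 100 →
      PySem.List.pyGetD ((pvDp nums m).getD i []) j 0 =
        (101 - j) * ((((pvSlots nums).take i).count j : Int))) ∧
    (∀ i : Nat, m < i → i ≤ nums.length → (pvDp nums m).getD i [] = List.replicate 101 0) := by
  intro m
  induction m with
  | zero =>
    intro _
    have h0 : pvDp nums 0 = List.replicate (nums.length + 1) (List.replicate 101 0) := by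
      rw [pvDp]
      rw [PySem.List.pyRange_one_eq_nil (by omega)]
      rfl
    rw [h0]
    refine ⟨by simp, ?_, ?_, ?_⟩
    · intro i hi
      rw [List.getD_replicate _ (by omega)]
      simp
    · intro i hi j h1 h2
      interval_cases i
      rw [List.getD_replicate _ (by omega)]
      rw [pv_pyGetD_toNat _ _ _ (by omega)]
      rw [List.getD_replicate _ (by omega)]
      simp
    · intro i hi hin
      rw [List.getD_replicate _ (by omega)]
  | succ m ih =>
    intro hm1
    have hm : m < nums.length := by omega
    obtain ⟨ihlen, ihrowlen, ihchar, ihzero⟩ := ih (by omega)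
    have hstep : pvDp nums (m + 1) = pvOuter nums (pvDp nums m) (m : Int) := by
      rw [pvDp, pvDp]
      rw [show ((m + 1 : Nat) : Int) = (m : Int) + 1 by push_cast; ring]
      rw [PySem.List.pyRange_one_succ_right (by omega)]
      rw [List.foldl_append]
      rfl
    set dpm := pvDp nums m with hdpm
    have hv_def : PySem.List.pyGetD nums (m : Int) 0 = nums.getD m 0 := by
      rw [pv_pyGetD_toNat _ _ _ (by omega)]; simp
    have hv_mem : nums.getD m 0 ∈ nums := by
      rw [List.getD_eq_getElem?_getD, List.getElem?_eq_getElem hm]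
      simp [List.getElem_mem]
    obtain ⟨hv1, hv2⟩ := hnums _ hv_mem
    have hmS : m < (pvSlots nums).length := by simp [pvSlots]; omega
    have hslot : PySem.Int.mod (nums.getD m 0) 101 = (pvSlots nums).getD m 0 := by
      rw [List.getD_eq_getElem _ _ hmS, List.getD_eq_getElem _ _ hm]
      simp [pvSlots]
    have hprev : PySem.List.pyGetD dpm (m : Int) [] = dpm.getD m [] := by
      rw [pv_pyGetD_toNat' _ _ (by omega)]; simp
    have hstart : PySem.List.pyGetD dpm ((m : Int) + 1) [] = List.replicate 101 0 := by
      rw [show (m : Int) + 1 = ((m + 1 : Nat) : Int) by push_cast; ring]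
      rw [pv_pyGetD_toNat' _ _ (by omega)]
      rw [show (((m + 1 : Nat) : Int)).toNat = m + 1 by omega]
      exact ihzero (m + 1) (by omega) (by omega)
    have hstartlen : (PySem.List.pyGetD dpm ((m : Int) + 1) []).length = 101 := by
      rw [hstart]; simp
    obtain ⟨hnewlen, hnewchar⟩ := pv_rowChar (dpm.getD m []) (nums.getD m 0) hv1 hv2 100 (by omega)
      (PySem.List.pyGetD dpm ((m : Int) + 1) []) hstartlen
    have hrange100 : (101 - ((100 : Nat) : Int)) = 1 := by norm_num
    rw [hrange100] at hnewlen hnewchar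
    set newRow := (PySem.List.pyRange 1 101 1).foldl
      (pvRowStep (PySem.List.pyGetD dpm (m : Int) []) (PySem.List.pyGetD nums (m : Int) 0))
      (PySem.List.pyGetD dpm ((m : Int) + 1) []) with hnewrow
    have hstep2 : pvDp nums (m + 1) = PySem.List.pySetD dpm ((m : Int) + 1) newRow := by
      rw [hstep, pvOuter, hnewrow]
    have hsetform : PySem.List.pySetD dpm ((m : Int) + 1) newRow = dpm.set (m + 1) newRow := by
      have htn : ((m : Int) + 1).toNat = m + 1 := by omega
      rw [PySem.List.pySetD_of_nonneg _ _ (by omega), htn]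
    rw [hstep2, hsetform]
    have hget_set : ∀ i : Nat, i ≠ m + 1 → (dpm.set (m + 1) newRow).getD i [] = dpm.getD i [] := by
      intro i hi
      simp [List.getD]
      rw [List.getElem?_set_ne (by omega)]
    have hget_set_self : (dpm.set (m + 1) newRow).getD (m + 1) [] = newRow := by
      have : m + 1 < dpm.length := by rw [ihlen]; omega
      simp [List.getD, this]
    have hnewchar' : ∀ j : Int, 1 ≤ j → j ≤ 100 →
        PySem.List.pyGetD newRow j 0 =
          (101 - j) * ((((pvSlots nums).take (m + 1)).count j : Int)) := by
      intro j h1 h2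
      rw [hnewrow, hv_def, hprev]
      rw [hnewchar j h1 h2]
      have hgd : (pvSlots nums).getD m 0 = (pvSlots nums)[m] := by
        rw [List.getD_eq_getElem?_getD, List.getElem?_eq_getElem hmS]; rfl
      have hcnt : ((pvSlots nums).take (m + 1)).count j =
          ((pvSlots nums).take m).count j + if j = (pvSlots nums).getD m 0 then 1 else 0 := by
        rw [List.take_succ, List.getElem?_eq_getElem hmS, hgd]
        rw [Option.toList_some, List.count_append]
        by_cases hje : j = (pvSlots nums)[m]
        · rw [hje]; simp
        · simp only [List.count_singleton]
          simp [hje, Ne.symm hje]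
      rw [hcnt, hslot]
      by_cases hjv : j = (pvSlots nums).getD m 0
      · rw [if_pos hjv, if_pos h1, ihchar m (by omega) j h1 h2]
        simp only [if_pos hjv]
        push_cast
        ring
      · rw [if_neg hjv, if_pos h1, ihchar m (by omega) j h1 h2, if_neg hjv]
        simp
    have hnewlen' : newRow.length = 101 := by
      rw [hnewrow, hv_def, hprev]; exact hnewlen
    refine ⟨?_, ?_, ?_, ?_⟩
    · rw [List.length_set]; exact ihlen
    · intro i hi
      by_cases hieq : i = m + 1
      · rw [hieq, hget_set_self]; exact hnewlen'
      · rw [hget_set i hieq]; exact ihrowlen i hi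
    · intro i hi j h1 h2
      by_cases hieq : i = m + 1
      · rw [hieq, hget_set_self]
        exact hnewchar' j h1 h2
      · rw [hget_set i hieq]
        exact ihchar i (by omega) j h1 h2
    · intro i hi hin
      rw [hget_set i (by omega)]
      exact ihzero i (by omega) hin

theorem pv_fold_gap (xs : List Int) : ∀ (p : Int) (mv : Option Int),
    (p :: xs).Pairwise (· < ·) → (∀ m, mv = some m → 1 ≤ m) →
    ((p :: xs).zip xs).foldl pvBstep (mv.getD (-1)) = ((xs.foldl pvAstep (mv, some p)).1).getD (-1) := by
  induction xs with
  | nil => intro p mv _ _; rfl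
  | cons x rest ih =>
    intro p mv hpw hmv
    have hpx : p < x := (List.pairwise_cons.mp hpw).1 x (by simp)
    have hpw' : (x :: rest).Pairwise (· < ·) := (List.pairwise_cons.mp hpw).2
    rw [List.zip_cons_cons, List.foldl_cons, List.foldl_cons]
    set d' : Int := (match mv with | none => x - p | some m => min m (x - p)) with hd'
    have hd1 : 1 ≤ d' := by
      cases mv with
      | none => simp [hd']; omega
      | some m' =>
        have : 1 ≤ m' := hmv m' rfl
        simp [hd']
        constructor <;> omega
    have hB : pvBstep (mv.getD (-1)) (p, x) = (some d' : Option Int).getD (-1) := by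
      cases mv with
      | none => simp [pvBstep, hd']
      | some m =>
        have hm : 1 ≤ m := hmv m rfl
        have hne : (m == -1) = false := by simp; omega
        simp only [pvBstep, Option.getD_some, hd', hne, Bool.false_or]
        rw [min_def]
        split_ifs <;> simp_all <;> omega
    have hA : pvAstep (mv, some p) x = (some d', some x) := by
      cases mv <;> rfl
    rw [hB, hA]
    exact ih x (some d') hpw' (by intro m hm; simp at hm; omega)

theorem pv_query_fold (vals : List Int) (h : vals.Pairwise (· < ·)) :
    ((vals.foldl pvAstep (none, none)).1).getD (-1) = (vals.zip vals.tail).foldl pvBstep (-1) := by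
  cases vals with
  | nil => rfl
  | cons v rest =>
    rw [List.foldl_cons]
    have h0 : pvAstep ((none : Option Int), (none : Option Int)) v = (none, some v) := rfl
    rw [h0, List.tail_cons]
    exact (pv_fold_gap rest v none h (by simp)).symm

theorem pv_take_set (res : List Int) (s : Nat) (m : Int) : (res.set s m).take s = res.take s := by
  apply List.ext_getElem
  · simp
  · intro i h1 h2
    simp only [List.getElem_take]
    rw [List.getElem_set_ne (by simp at h1; omega)]

theorem pv_assemble (h : Int × Int → Option Int) :
    ∀ (qs : List (Int × Int)) (s : Nat) (res : List Int), res.length = s + qs.length →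
    res.drop s = List.replicate qs.length (-1) →
    (PySem.List.enumerate qs (s : Int)).foldl
      (fun res iq => match h iq.2 with
        | some m => PySem.List.pySetD res iq.1 m
        | none => res) res
    = res.take s ++ qs.map (fun q => (h q).getD (-1)) := by
  intro qs
  induction qs with
  | nil =>
    intro s res hlen _
    simp only [PySem.List.enumerate, List.foldl_nil, List.map_nil, List.append_nil]
    exact (List.take_of_length_le (by simp at hlen; omega)).symm
  | cons q qs ih =>
    intro s res hlen hdrop
    rw [PySem.List.enumerate_cons, List.foldl_cons]
    have hlt : s < res.length := by simp at hlen; omega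
    have hdropc : res.drop s = -1 :: List.replicate qs.length (-1) := by
      rw [hdrop]; simp [List.replicate]
    have hgets : res[s]? = some (-1) := by
      have h0 : (res.drop s)[0]? = res[s]? := by
        rw [List.getElem?_drop]
        simp
      rw [← h0, hdropc]
      rfl
    have hcast : (s : Int) + 1 = ((s + 1 : Nat) : Int) := by push_cast; ring
    cases hq : h q with
    | none =>
      simp only [hq]
      have hd2 : res.drop (s + 1) = List.replicate qs.length (-1) := by
        rw [← List.drop_drop, hdropc]
        rfl
      rw [hcast, ih (s + 1) res (by simp at hlen ⊢; omega) hd2]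
      rw [List.take_succ, hgets]
      simp [hq]
    | some m =>
      simp only [hq]
      have hset : PySem.List.pySetD res (s : Int) m = res.set s m := by
        rw [PySem.List.pySetD_of_nonneg _ _ (by omega)]
        simp
      rw [hset]
      have hlen2 : (res.set s m).length = (s + 1) + qs.length := by
        simp; simp at hlen; omega
      have hd2 : (res.set s m).drop (s + 1) = List.replicate qs.length (-1) := by
        rw [List.drop_set_of_lt (by omega)]
        rw [← List.drop_drop, hdropc]
        rfl
      rw [hcast, ih (s + 1) _ hlen2 hd2]
      rw [List.take_succ, List.getElem?_set_self hlt, pv_take_set]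
      simp [hq]

theorem pv_gapfold_short (xs : List Int) (h : xs.length ≤ 1) :
    (xs.zip xs.tail).foldl pvBstep (-1) = -1 := by
  match xs, h with
  | [], _ => rfl
  | [x], _ => rfl

theorem pv_zip_tail_nil (xs : List Int) (h : xs.length ≤ 1) : xs.zip xs.tail = [] := by
  match xs, h with
  | [], _ => rfl
  | [x], _ => rfl

theorem pv_nodup_all_eq (xs : List Int) (hnd : xs.Nodup)
    (hall : ∀ u ∈ xs, ∀ v ∈ xs, u = v) : xs.length ≤ 1 := by
  match xs with
  | [] => simp
  | [x] => simp
  | a :: b :: t =>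
    have hab : a ≠ b := by simp at hnd; tauto
    exact absurd (hall a (by simp) b (by simp)) hab

theorem pv_zip_tail_lt (xs : List Int) (hpw : xs.Pairwise (· < ·)) :
    ∀ p ∈ xs.zip xs.tail, p.1 < p.2 := by
  induction xs with
  | nil => simp
  | cons a t ih =>
    cases t with
    | nil => simp
    | cons b u =>
      intro p hp
      rw [List.tail_cons, List.zip_cons_cons] at hp
      rcases List.mem_cons.mp hp with rfl | hp'
      · exact (List.pairwise_cons.mp hpw).1 b (by simp)
      · exact ih (List.pairwise_cons.mp hpw).2 p (by rw [List.tail_cons]; exact hp')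

theorem pv_step_min (t : List Int) : ∀ acc : Int, 1 ≤ acc → (∀ d ∈ t, 1 ≤ d) →
    t.foldl (fun best d => if best == -1 || d < best then d else best) acc = t.foldl min acc := by
  induction t with
  | nil => intro _ _ _; rfl
  | cons d t ih =>
    intro acc hacc hall
    simp only [List.foldl_cons]
    have h1 : 1 ≤ d := hall d (by simp)
    have hne : (acc == -1) = false := by simp; omega
    have hstep : (if acc == -1 || d < acc then d else acc) = min acc d := by
      rw [hne, Bool.false_or]
      rcases lt_or_ge d acc with h | h
      · rw [if_pos (decide_eq_true h), min_eq_right h.le]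
      · rw [if_neg (by simpa using not_lt.mpr h), min_eq_left h]
    rw [hstep]
    exact ih (min acc d) (le_min hacc h1) (fun x hx => hall x (by simp [hx]))

-- min(gaps) with default -1 equals the running-minimum fold over the gap pairs
theorem pv_min_gaps (xs : List Int) (hpw : xs.Pairwise (· < ·)) :
    (match PySem.List.min? ((xs.zip xs.tail).map (fun ab => ab.2 - ab.1)) (fun x => x) with
     | some m => m
     | none => -1) = (xs.zip xs.tail).foldl pvBstep (-1) := by
  have hgap : ∀ d ∈ (xs.zip xs.tail).map (fun ab => ab.2 - ab.1), 1 ≤ d := by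
    intro d hd
    obtain ⟨p, hp, rfl⟩ := List.mem_map.mp hd
    have := pv_zip_tail_lt xs hpw p hp
    omega
  have hfold : (xs.zip xs.tail).foldl pvBstep (-1) =
      ((xs.zip xs.tail).map (fun ab => ab.2 - ab.1)).foldl
        (fun best d => if best == -1 || d < best then d else best) (-1) := by
    rw [List.foldl_map]
    rfl
  rw [hfold]
  set gs := (xs.zip xs.tail).map (fun ab => ab.2 - ab.1) with hgs
  clear_value gs
  cases gs with
  | nil => rfl
  | cons g t =>
    have h1 : 1 ≤ g := hgap g (by simp)
    rw [PySem.List.min?_id_cons]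
    simp only [List.foldl_cons]
    have hg0 : (if (-1 : Int) == -1 || g < -1 then g else (-1 : Int)) = g := by simp
    rw [hg0]
    exact (pv_step_min t g h1 (fun x hx => hgap x (by simp [hx]))).symm

theorem pv_perQuery (nums : List Int) (hnums : ∀ v ∈ nums, -101 ≤ v ∧ v ≤ 100)
    (l r : Int)
    (hl1 : 0 ≤ l) (hl2 : l ≤ (nums.length : Int))
    (hr1 : 0 ≤ r + 1) (hr2 : r + 1 ≤ (nums.length : Int))
    (hwb : ∀ v ∈ PySem.List.slice nums (some l) (some (r + 1)), 0 ≤ v ∧ v ≤ 100) :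
    (pvQueryOpt (pvDp nums nums.length) (l, r)).getD (-1) =
    (let window := PySem.List.slice nums (some l) (some (r + 1))
     let present := (PySem.List.pyRange 1 101 1).filter (fun v => decide (v ∈ window))
     let gaps := (present.zip present.tail).map (fun ab => ab.2 - ab.1)
     match PySem.List.min? gaps (fun x => x) with
     | some m => m
     | none => -1) := by
  obtain ⟨hlen, hrowlen, hchar, _⟩ := pv_dpChar nums hnums nums.length le_rfl
  set loN := l.toNat with hloN
  set hiN := (r + 1).toNat with hhiN
  have hloNle : loN ≤ nums.length := by omega
  have hhiNle : hiN ≤ nums.length := by omega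
  set window := PySem.List.slice nums (some l) (some (r + 1)) with hwin
  have hwinEq : window = (nums.drop loN).take (hiN - loN) := by
    rw [hwin, show l = ((loN : Nat) : Int) by omega, show r + 1 = ((hiN : Nat) : Int) by omega,
      PySem.List.slice_natCast]
  set slots := pvSlots nums with hslots
  -- with every window value in 0..100 its slot is the value itself
  have hsliceS : (slots.drop loN).take (hiN - loN) = window := by
    rw [hslots, pvSlots, ← List.map_drop, ← List.map_take, ← hwinEq]
    rw [show window.map (fun v => PySem.Int.mod v 101) = window.map id from ?_, List.map_id]
    apply List.map_congr_left
    intro v hv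
    obtain ⟨h1, h2⟩ := hwb v hv
    rw [PySem.Int.mod_eq_emod_of_pos (by norm_num), pv_emod_small v 101 (by omega) (by omega)]
    rfl
  have hrowL : PySem.List.pyGetD (pvDp nums nums.length) l [] = (pvDp nums nums.length).getD loN [] := by
    rw [pv_pyGetD_toNat' _ _ hl1]
  have hrowR : PySem.List.pyGetD (pvDp nums nums.length) (r + 1) [] =
      (pvDp nums nums.length).getD hiN [] := by
    rw [pv_pyGetD_toNat' _ _ hr1]
  -- presence in the table difference = membership in the window
  have hpres : ∀ j : Int, 1 ≤ j → j ≤ 100 →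
      (PySem.List.pyGetD (PySem.List.pyGetD (pvDp nums nums.length) (r + 1) []) j 0 -
       PySem.List.pyGetD (PySem.List.pyGetD (pvDp nums nums.length) l []) j 0 > 0 ↔
       j ∈ window) := by
    intro j h1 h2
    rw [hrowL, hrowR, hchar hiN hhiNle j h1 h2, hchar loN hloNle j h1 h2]
    by_cases hlr : loN ≤ hiN
    · have hsplit : (slots.take hiN).count j = (slots.take loN).count j + window.count j := by
        conv_lhs => rw [show hiN = loN + (hiN - loN) from by omega]
        rw [List.take_add, List.count_append, hsliceS]
      rw [hsplit]
      constructor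
      · intro hpos
        by_contra hmem
        rw [List.count_eq_zero.mpr hmem] at hpos
        simp at hpos
      · intro hmem
        have hcs : 0 < window.count j := List.count_pos_iff.mpr hmem
        have h101 : (0 : Int) < 101 - j := by omega
        have : (0 : Int) < (101 - j) * (window.count j : Int) :=
          mul_pos h101 (by exact_mod_cast hcs)
        push_cast
        nlinarith
    · have hempty : window = [] := by
        rw [hwinEq, show hiN - loN = 0 from by omega]
        simp
      have hpre2 : (slots.take hiN) <+: (slots.take loN) :=
        List.take_prefix_take_left (by omega)
      have hcle : (slots.take hiN).count j ≤ (slots.take loN).count j := hpre2.count_le j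
      have hmul : (101 - j) * ((slots.take hiN).count j : Int) ≤
          (101 - j) * ((slots.take loN).count j : Int) :=
        Int.mul_le_mul_of_nonneg_left (by exact_mod_cast hcle) (by omega)
      simp [hempty]
      omega
  -- the port's query fold is the fold over the present values, in increasing order
  have hQ : pvQueryOpt (pvDp nums nums.length) (l, r) =
      (((PySem.List.pyRange 1 101 1).filter (fun j => decide (j ∈ window))).foldl pvAstep
        (none, none)).1 := by
    rw [pvQueryOpt]
    congr 1
    rw [List.foldl_filter]
    apply PySem.List.foldl_congr_mem
    intro st j hj
    obtain ⟨hj1, hj2⟩ := PySem.List.mem_pyRange_one.mp hj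
    have hiff := hpres j (by omega) (by omega)
    by_cases hc : j ∈ window
    · rw [if_pos (hiff.mpr hc), if_pos (by simp [hc])]
    · rw [if_neg (fun hp => hc (hiff.mp hp)), if_neg (by simp [hc])]
  have hpw : ((PySem.List.pyRange 1 101 1).filter (fun j => decide (j ∈ window))).Pairwise (· < ·) :=
    (PySem.List.pairwise_lt_pyRange_one 1 101).filter _
  show (pvQueryOpt (pvDp nums nums.length) (l, r)).getD (-1) =
    (match PySem.List.min? ((((PySem.List.pyRange 1 101 1).filter
        (fun v => decide (v ∈ window))).zip
        ((PySem.List.pyRange 1 101 1).filter (fun v => decide (v ∈ window))).tail).map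
        (fun ab => ab.2 - ab.1)) (fun x => x) with
     | some m => m
     | none => -1)
  rw [hQ, pv_query_fold _ hpw, pv_min_gaps _ hpw]

theorem pv_perQuery_deg (nums : List Int) (hnums : ∀ v ∈ nums, -101 ≤ v ∧ v ≤ 100)
    (l r : Int)
    (hl1 : -((nums.length : Int) + 1) ≤ l) (hl2 : l ≤ (nums.length : Int))
    (hr1 : -((nums.length : Int) + 1) ≤ r + 1) (hr2 : r + 1 ≤ (nums.length : Int))
    (hA : ∀ u ∈ pvWrapWindow nums l (r + 1), u ≠ 0 → u ≠ -101 →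
            ∀ v ∈ pvWrapWindow nums l (r + 1), v ≠ 0 → v ≠ -101 → u = v)
    (hB : ∀ u ∈ PySem.List.slice nums (some l) (some (r + 1)), 1 ≤ u → u ≤ 100 →
            ∀ v ∈ PySem.List.slice nums (some l) (some (r + 1)), 1 ≤ v → v ≤ 100 → u = v) :
    (pvQueryOpt (pvDp nums nums.length) (l, r)).getD (-1) =
    (let window := PySem.List.slice nums (some l) (some (r + 1))
     let present := (PySem.List.pyRange 1 101 1).filter (fun v => decide (v ∈ window))
     let gaps := (present.zip present.tail).map (fun ab => ab.2 - ab.1)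
     match PySem.List.min? gaps (fun x => x) with
     | some m => m
     | none => -1) := by
  obtain ⟨hlen, hrowlen, hchar, _⟩ := pv_dpChar nums hnums nums.length le_rfl
  have hn1 : (0 : Int) < (nums.length : Int) + 1 := by omega
  have hdLen : ((pvDp nums nums.length).length : Int) = (nums.length : Int) + 1 := by
    rw [hlen]; push_cast; ring
  set loN := (PySem.Int.mod l ((nums.length : Int) + 1)).toNat with hloN
  set hiN := (PySem.Int.mod (r + 1) ((nums.length : Int) + 1)).toNat with hhiN
  have hlo := PySem.Int.mod_nonneg l hn1
  have hloLt := PySem.Int.mod_lt l hn1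
  have hhi := PySem.Int.mod_nonneg (r + 1) hn1
  have hhiLt := PySem.Int.mod_lt (r + 1) hn1
  have hloNle : loN ≤ nums.length := by omega
  have hhiNle : hiN ≤ nums.length := by omega
  set slots := pvSlots nums with hslots
  -- the two prefix rows A's query reads, by Python wraparound
  have hrowL : PySem.List.pyGetD (pvDp nums nums.length) l [] =
      (pvDp nums nums.length).getD loN [] := by
    rw [pv_pyGetD_wrap _ l [] (by omega) (by omega), hdLen]
  have hrowR : PySem.List.pyGetD (pvDp nums nums.length) (r + 1) [] =
      (pvDp nums nums.length).getD hiN [] := by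
    rw [pv_pyGetD_wrap _ (r + 1) [] (by omega) (by omega), hdLen]
  set wA := pvWrapWindow nums l (r + 1) with hwA
  have hwAEq : wA = (nums.drop loN).take (hiN - loN) := by rw [hwA, pvWrapWindow]
  have hsliceS : (slots.drop loN).take (hiN - loN) =
      wA.map (fun v => PySem.Int.mod v 101) := by
    rw [hslots, pvSlots, ← List.map_drop, ← List.map_take, ← hwAEq]
  -- every slot the table reports present lies in wA's slot list
  have hPmem : ∀ j : Int, 1 ≤ j → j ≤ 100 →
      PySem.List.pyGetD (PySem.List.pyGetD (pvDp nums nums.length) (r + 1) []) j 0 -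
        PySem.List.pyGetD (PySem.List.pyGetD (pvDp nums nums.length) l []) j 0 > 0 →
      j ∈ wA.map (fun v => PySem.Int.mod v 101) := by
    intro j h1 h2 hpos
    rw [hrowL, hrowR, hchar hiN hhiNle j h1 h2, hchar loN hloNle j h1 h2] at hpos
    by_cases hlr : loN ≤ hiN
    · have hsplit : (slots.take hiN).count j =
          (slots.take loN).count j + (wA.map (fun v => PySem.Int.mod v 101)).count j := by
        conv_lhs => rw [show hiN = loN + (hiN - loN) from by omega]
        rw [List.take_add, List.count_append, hsliceS]
      rw [hsplit] at hpos
      by_contra hmem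
      rw [List.count_eq_zero.mpr hmem] at hpos
      simp at hpos
    · have hpre2 : (slots.take hiN) <+: (slots.take loN) :=
        List.take_prefix_take_left (by omega)
      have hcle : (slots.take hiN).count j ≤ (slots.take loN).count j := hpre2.count_le j
      have hmul : (101 - j) * ((slots.take hiN).count j : Int) ≤
          (101 - j) * ((slots.take loN).count j : Int) :=
        Int.mul_le_mul_of_nonneg_left (by exact_mod_cast hcle) (by omega)
      omega
  -- the port's query fold, as a fold over the present slots
  have hQ : pvQueryOpt (pvDp nums nums.length) (l, r) =
      (((PySem.List.pyRange 1 101 1).filter (fun j => decide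
          (PySem.List.pyGetD (PySem.List.pyGetD (pvDp nums nums.length) (r + 1) []) j 0 -
           PySem.List.pyGetD (PySem.List.pyGetD (pvDp nums nums.length) l []) j 0 > 0))).foldl
        pvAstep (none, none)).1 := by
    rw [pvQueryOpt]
    congr 1
    rw [List.foldl_filter]
    apply PySem.List.foldl_congr_mem
    intro st j hj
    by_cases hc : PySem.List.pyGetD (PySem.List.pyGetD (pvDp nums nums.length) (r + 1) []) j 0 -
        PySem.List.pyGetD (PySem.List.pyGetD (pvDp nums nums.length) l []) j 0 > 0
    · rw [if_pos hc, if_pos (decide_eq_true hc)]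
    · rw [if_neg hc, if_neg (by simpa using hc)]
  set L := (PySem.List.pyRange 1 101 1).filter (fun j => decide
      (PySem.List.pyGetD (PySem.List.pyGetD (pvDp nums nums.length) (r + 1) []) j 0 -
       PySem.List.pyGetD (PySem.List.pyGetD (pvDp nums nums.length) l []) j 0 > 0)) with hL
  have hpw : L.Pairwise (· < ·) := (PySem.List.pairwise_lt_pyRange_one 1 101).filter _
  have hLnodup : L.Nodup := hpw.imp (fun h => ne_of_lt h)
  -- wA's nonzero slots all come from one value, so L holds at most one slot
  have hwAv : ∀ v ∈ wA, -101 ≤ v ∧ v ≤ 100 := by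
    intro v hv
    refine hnums v ?_
    rw [hwAEq] at hv
    exact List.mem_of_mem_drop (List.mem_of_mem_take hv)
  have hslotval : ∀ v ∈ wA, PySem.Int.mod v 101 ≠ 0 → (v ≠ 0 ∧ v ≠ -101) := by
    intro v hv hnz
    refine ⟨?_, ?_⟩ <;> rintro rfl <;> exact hnz rfl
  have hLshort : L.length ≤ 1 := by
    refine pv_nodup_all_eq L hLnodup ?_
    intro u hu v hv
    obtain ⟨hur, hud⟩ := List.mem_filter.mp hu
    obtain ⟨hvr, hvd⟩ := List.mem_filter.mp hv
    obtain ⟨hu1, hu2⟩ := PySem.List.mem_pyRange_one.mp hur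
    obtain ⟨hv1, hv2⟩ := PySem.List.mem_pyRange_one.mp hvr
    have hum := hPmem u (by omega) (by omega) (of_decide_eq_true hud)
    have hvm := hPmem v (by omega) (by omega) (of_decide_eq_true hvd)
    obtain ⟨a, ha, hae⟩ := List.mem_map.mp hum
    obtain ⟨b, hb, hbe⟩ := List.mem_map.mp hvm
    have hanz : PySem.Int.mod a 101 ≠ 0 := by rw [hae]; omega
    have hbnz : PySem.Int.mod b 101 ≠ 0 := by rw [hbe]; omega
    obtain ⟨ha0, ha101⟩ := hslotval a ha hanz
    obtain ⟨hb0, hb101⟩ := hslotval b hb hbnz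
    rw [← hae, ← hbe, hA a ha ha0 ha101 b hb hb0 hb101]
  -- B's present values are all one value too
  set window := PySem.List.slice nums (some l) (some (r + 1)) with hwin
  set present := (PySem.List.pyRange 1 101 1).filter (fun v => decide (v ∈ window)) with hpresent
  have hppw : present.Pairwise (· < ·) := (PySem.List.pairwise_lt_pyRange_one 1 101).filter _
  have hpshort : present.length ≤ 1 := by
    refine pv_nodup_all_eq present (hppw.imp (fun h => ne_of_lt h)) ?_
    intro u hu v hv
    obtain ⟨hur, hud⟩ := List.mem_filter.mp hu
    obtain ⟨hvr, hvd⟩ := List.mem_filter.mp hv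
    obtain ⟨hu1, hu2⟩ := PySem.List.mem_pyRange_one.mp hur
    obtain ⟨hv1, hv2⟩ := PySem.List.mem_pyRange_one.mp hvr
    exact hB u (of_decide_eq_true hud) (by omega) (by omega)
      v (of_decide_eq_true hvd) (by omega) (by omega)
  show (pvQueryOpt (pvDp nums nums.length) (l, r)).getD (-1) =
    (match PySem.List.min? ((present.zip present.tail).map (fun ab => ab.2 - ab.1))
        (fun x => x) with
     | some m => m
     | none => -1)
  rw [hQ, pv_query_fold _ hpw, pv_gapfold_short _ hLshort, pv_zip_tail_nil _ hpshort]
  rfl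

-- ===== VERDICT (by name: the statement is the Claim_ definition above) =====
theorem solution_spec : Claim_equal_solution := by
  unfold Claim_equal_solution
  intro nums queries _ hpre
  unfold Spec_solution
  obtain ⟨hnums, hqs⟩ := hpre
  have hsol : solution nums queries =
      (PySem.List.enumerate queries (((0 : Nat) : Int))).foldl
        (fun res iq => match pvQueryOpt (pvDp nums nums.length) iq.2 with
          | some m => PySem.List.pySetD res iq.1 m
          | none => res)
        (List.replicate queries.length (-1)) := rfl
  have halt : solution_alt nums queries =
      queries.foldl (fun res q => res ++
        [(let window := PySem.List.slice nums (some q.1) (some (q.2 + 1))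
          let present := (PySem.List.pyRange 1 101 1).filter (fun v => decide (v ∈ window))
          let gaps := (present.zip present.tail).map (fun ab => ab.2 - ab.1)
          match PySem.List.min? gaps (fun x => x) with
          | some m => m
          | none => -1)]) [] := rfl
  rw [hsol, pv_assemble (fun q => pvQueryOpt (pvDp nums nums.length) q) queries 0
    (List.replicate queries.length (-1)) (by simp) (by simp)]
  rw [halt, PySem.List.foldl_append_singleton_eq_map]
  simp only [List.take_zero, List.nil_append]
  apply List.map_congr_left
  intro q hq
  obtain ⟨l, r⟩ := q
  obtain ⟨hq1, hq2, hq3, hq4, hq5⟩ := hqs (l, r) hq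
  simp only at hq1 hq2 hq3 hq4 hq5
  rcases hq5 with ⟨hb1, hb2, hcase⟩ | ⟨hdA, hdB⟩
  · exact pv_perQuery nums hnums l r hb1 hq2 hb2 hq4 hcase
  · exact pv_perQuery_deg nums hnums l r hq1 hq2 hq3 hq4 hdA hdB
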